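-- pv_equiv track=rewrite | github.com/cuchoco/coding_test | exam_question/greedy_03_string_reverse.py | solution
-- ===== SOURCE A (Python) =====
-- def solution(data):
--     zero = 0
--     one = 0
--     # 모두 1을 만드는 경우
--     a = data.split('1')
--     for i in a:
--         if i:
--             one +=1
--
--     # 모두 0을 만드는 경우
--     a = data.split('0')
--     for i in a:
--         if i:
--             zero +=1
--
--     return min(zero, one)
-- ===== SOURCE B (Python) =====
-- def solution(data):
--     one = 0
--     zero = 0
--     prev = None
--     for ch in data:
--         if ch != '1' and (prev is None or prev == '1'):
--             one += 1
--         if ch != '0' and (prev is None or prev == '0'):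
--             zero += 1
--         prev = ch
--     return min(zero, one)
-- ===== Notes on version B (the rewrite author's own statement) =====
-- stated objective: alternative
-- what changed: Replaces the two data.split(...) passes that materialise lists of substring pieces with a single left-to-right scan tracking the previous character and counting run starts for both separators at once, in O(1) extra space.
import Mathlib
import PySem

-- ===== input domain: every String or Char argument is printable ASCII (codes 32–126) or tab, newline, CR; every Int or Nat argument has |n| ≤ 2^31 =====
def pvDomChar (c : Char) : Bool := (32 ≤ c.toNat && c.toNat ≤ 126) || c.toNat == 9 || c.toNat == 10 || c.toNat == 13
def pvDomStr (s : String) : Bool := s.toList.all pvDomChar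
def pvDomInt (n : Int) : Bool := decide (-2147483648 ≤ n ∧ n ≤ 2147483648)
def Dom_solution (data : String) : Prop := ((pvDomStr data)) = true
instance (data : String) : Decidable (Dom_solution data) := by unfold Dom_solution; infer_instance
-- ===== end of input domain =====

-- B replaces A's two split()-then-count passes by one left-to-right scan (previous character tracked,
-- run starts counted for both separators at once) in O(1) extra space; same O(n) time, no speed claim.

-- ===== PORT A =====
-- a = data.split(sep); for i in a: if i: n += 1   (done for sep = '1' then sep = '0'), return min(zero, one)
def solution (data : String) : Int :=
  let a1 := PySem.Chars.splitOn data.toList ['1']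
  let one : Int := a1.foldl (fun n i => if i ≠ [] then n + 1 else n) 0
  let a0 := PySem.Chars.splitOn data.toList ['0']
  let zero : Int := a0.foldl (fun n i => if i ≠ [] then n + 1 else n) 0
  min zero one

-- ===== PORT B =====
-- single pass, state = (prev : Option Char, one, zero); a counter bumps when ch starts a run of non-separator chars
def solution_alt (data : String) : Int :=
  let st := data.toList.foldl
    (fun (st : Option Char × Int × Int) ch =>
      (some ch,
       (if ch ≠ '1' ∧ (st.1 = none ∨ st.1 = some '1') then st.2.1 + 1 else st.2.1),
       (if ch ≠ '0' ∧ (st.1 = none ∨ st.1 = some '0') then st.2.2 + 1 else st.2.2)))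
    (none, 0, 0)
  min st.2.2 st.2.1

-- ===== PRECONDITION & SPEC =====
def Spec_solution (data : String) (out : Int) : Prop := out = solution_alt data
instance (data : String) (out : Int) : Decidable (Spec_solution data out) := by unfold Spec_solution; infer_instance

-- ===== CLAIM (what is proved, stated in full; the proofs are below) =====
def Claim_equal_solution : Prop := ∀ (data : String), Dom_solution data → Spec_solution data (solution data)

-- ===== LEMMAS AND PROOFS =====

-- structural reformulation of Chars.splitOn with a single-character separator
def pvSp (c : Char) : List Char → List Char → List (List Char)
  | [], cur => [cur.reverse]
  | x :: rest, cur => if x = c then cur.reverse :: pvSp c rest [] else pvSp c rest (x :: cur)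

-- count of nonempty pieces
def pvCountNE : List (List Char) → Int
  | [] => 0
  | x :: r => (if x = [] then 0 else 1) + pvCountNE r

-- run-start counter; the flag says "the previous position was a separator (or the string start)"
def pvCnt (c : Char) (atStart : Bool) : List Char → Int
  | [] => 0
  | x :: rest =>
      if x = c then pvCnt c true rest
      else (if atStart then 1 else 0) + pvCnt c false rest

theorem pvGo_eq_sp (c : Char) (fuel : Nat) (l cur : List Char) (acc : List (List Char))
    (h : l.length ≤ fuel) :
    PySem.Chars.splitOn.go [c] fuel l cur acc = acc.reverse ++ pvSp c l cur := by
  induction fuel generalizing l cur acc with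
  | zero =>
      have hl : l = [] := List.eq_nil_of_length_eq_zero (Nat.le_zero.mp h)
      subst hl
      rw [PySem.Chars.splitOn.go.eq_def]
      simp [pvSp]
  | succ fuel ih =>
      cases l with
      | nil =>
          rw [PySem.Chars.splitOn.go.eq_def]
          simp [pvSp]
      | cons x rest =>
          rw [PySem.Chars.splitOn.go.eq_def]
          simp only [List.length_cons] at h
          by_cases hx : x = c
          · subst hx
            simp only [List.isPrefixOf, BEq.rfl, Bool.true_and, if_true, List.length_singleton, List.drop_succ_cons, List.drop_zero]
            rw [ih rest [] (cur.reverse :: acc) (by omega)]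
            simp [pvSp]
          · have hne : (c == x) = false := by
              simp only [beq_eq_false_iff_ne]; exact fun h' => hx h'.symm
            simp only [List.isPrefixOf, hne, Bool.false_and, Bool.false_eq_true, if_false]
            rw [ih rest (x :: cur) acc (by omega)]
            simp [pvSp, hx]

theorem pvSplitOn_eq_sp (c : Char) (l : List Char) :
    PySem.Chars.splitOn l [c] = pvSp c l [] := by
  unfold PySem.Chars.splitOn
  rw [pvGo_eq_sp c (l.length + 1) l [] [] (by omega)]
  rfl

theorem pvCountNE_sp (c : Char) (l cur : List Char) :
    pvCountNE (pvSp c l cur) = (if cur = [] then 0 else 1) + pvCnt c cur.isEmpty l := by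
  induction l generalizing cur with
  | nil => by_cases h : cur = [] <;> simp [pvSp, pvCountNE, pvCnt, h]
  | cons x rest ih =>
      by_cases hx : x = c
      · subst hx
        simp only [pvSp, pvCnt, if_true, pvCountNE]
        rw [ih []]
        by_cases h : cur = [] <;> simp [h]
      · simp only [pvSp, pvCnt, if_neg hx]
        rw [ih (x :: cur)]
        by_cases h : cur = [] <;> simp [h]

theorem pvFoldCount (ls : List (List Char)) (k : Int) :
    ls.foldl (fun n i => if i ≠ [] then n + 1 else n) k = k + pvCountNE ls := by
  induction ls generalizing k with
  | nil => simp [pvCountNE]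
  | cons x r ih =>
      simp only [List.foldl_cons, pvCountNE, ih]
      by_cases h : x = [] <;> simp [h] <;> ring

theorem pvFoldB (l : List Char) (prev : Option Char) (one zero : Int) :
    (l.foldl
      (fun (st : Option Char × Int × Int) ch =>
        (some ch,
         (if ch ≠ '1' ∧ (st.1 = none ∨ st.1 = some '1') then st.2.1 + 1 else st.2.1),
         (if ch ≠ '0' ∧ (st.1 = none ∨ st.1 = some '0') then st.2.2 + 1 else st.2.2)))
      (prev, one, zero)).2.1
      = one + pvCnt '1' (decide (prev = none ∨ prev = some '1')) l
    ∧ (l.foldl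
      (fun (st : Option Char × Int × Int) ch =>
        (some ch,
         (if ch ≠ '1' ∧ (st.1 = none ∨ st.1 = some '1') then st.2.1 + 1 else st.2.1),
         (if ch ≠ '0' ∧ (st.1 = none ∨ st.1 = some '0') then st.2.2 + 1 else st.2.2)))
      (prev, one, zero)).2.2
      = zero + pvCnt '0' (decide (prev = none ∨ prev = some '0')) l := by
  induction l generalizing prev one zero with
  | nil => simp [pvCnt]
  | cons x rest ih =>
      simp only [List.foldl_cons]
      rcases ih (some x)
        (if x ≠ '1' ∧ (prev = none ∨ prev = some '1') then one + 1 else one)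
        (if x ≠ '0' ∧ (prev = none ∨ prev = some '0') then zero + 1 else zero) with ⟨ih1, ih0⟩
      rw [ih1, ih0]
      constructor
      · by_cases h1 : x = '1'
        · subst h1; simp [pvCnt]
        · by_cases hp : prev = none ∨ prev = some '1' <;>
            simp [pvCnt, h1, hp] <;> ring
      · by_cases h0 : x = '0'
        · subst h0; simp [pvCnt]
        · by_cases hp : prev = none ∨ prev = some '0' <;>
            simp [pvCnt, h0, hp] <;> ring

-- ===== VERDICT (by name: the statement is the Claim_ definition above) =====
theorem solution_spec : Claim_equal_solution := by
  intro data _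
  unfold Spec_solution solution solution_alt
  rcases pvFoldB data.toList none 0 0 with ⟨h1, h0⟩
  simp only [h1, h0, pvSplitOn_eq_sp, pvFoldCount, pvCountNE_sp]
  simp
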